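-- pv_equiv track=rewrite | github.com/zone31/Advent-of-Code-2023 | Days/2/Python/run.py | solver_1star
-- ===== SOURCE A (Python) =====
-- def solver_1star(data: dict[list[dict[str, int]]]):
--     """
--     Iterate over each game, and find the target
--     """
--     target = {
--         "red": 12,
--         "green": 13,
--         "blue": 14,
--     }
--
--     ret = []
--     for game_id, game in data.items():
--         valid = True
--         for grab in game:
--             if not all([target[color] >= val for color, val in grab.items()]):
--                 valid = False
--                 break
--         if valid:
--             ret.append(game_id)
--     return sum(ret)
-- ===== SOURCE B (Python) =====
-- def solver_1star(data: dict[list[dict[str, int]]]):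
--     """
--     For each game, aggregate the maximum count seen per color across all grabs,
--     then sum the ids of games whose per-color maxima fit within the target
--     (a color absent from the target makes the game invalid).
--     """
--     target = {
--         "red": 12,
--         "green": 13,
--         "blue": 14,
--     }
--
--     total = 0
--     for game_id, game in data.items():
--         maxima = {}
--         for grab in game:
--             for color, val in grab.items():
--                 if color not in maxima or val > maxima[color]:
--                     maxima[color] = val
--         if all(color in target and target[color] >= val for color, val in maxima.items()):
--             total += game_id
--     return total
-- ===== Notes on version B (the rewrite author's own statement) =====
-- stated objective: alternative
-- what changed: B replaces A's per-grab short-circuit validity flag (break out of the grab loop, collect ids in a list, sum at the end) by building a per-color maximum dict for each game and deciding validity with one comparison pass over that dict, accumulating the sum directly.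
import Mathlib
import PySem

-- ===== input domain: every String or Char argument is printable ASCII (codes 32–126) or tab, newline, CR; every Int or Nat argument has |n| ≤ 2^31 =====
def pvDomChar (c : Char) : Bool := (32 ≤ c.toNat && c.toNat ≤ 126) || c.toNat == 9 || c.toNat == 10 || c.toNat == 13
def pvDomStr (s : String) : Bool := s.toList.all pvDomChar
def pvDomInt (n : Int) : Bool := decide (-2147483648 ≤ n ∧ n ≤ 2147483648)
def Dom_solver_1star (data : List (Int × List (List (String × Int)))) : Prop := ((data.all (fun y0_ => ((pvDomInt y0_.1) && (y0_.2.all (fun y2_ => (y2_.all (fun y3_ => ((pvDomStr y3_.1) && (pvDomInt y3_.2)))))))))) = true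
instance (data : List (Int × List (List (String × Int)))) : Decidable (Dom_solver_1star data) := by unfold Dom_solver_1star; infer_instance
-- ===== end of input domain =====

-- B aggregates per-color maxima into a dict per game and checks them in one pass
-- (unknown colors invalidate the game), instead of A's per-grab short-circuit flag
-- plus collected-then-summed id list (alternative decomposition, same cost).


-- ===== PORT A =====
def pvTargetA : PySem.Dict String Int :=
  PySem.Dict.ofList [("red", 12), ("green", 13), ("blue", 14)]

-- A's inner 'for grab in game' loop with its break; Python's target[color] raises
-- KeyError on an unknown color (such evaluations are excluded by Pre_), so it is
-- ported as getD _ 0, which Pre_ guarantees is never the value actually used.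
def pvAValid : List (List (String × Int)) → Bool
  | [] => true
  | grab :: rest =>
      if !((grab.map (fun p => decide (pvTargetA.getD p.1 0 ≥ p.2))).all id) then false
      else pvAValid rest

def solver_1star (data : List (Int × List (List (String × Int)))) : Int :=
  let ret := data.foldl (fun ret p => if pvAValid p.2 then ret ++ [p.1] else ret) ([] : List Int)
  ret.foldl (· + ·) 0

-- ===== PORT B =====
def pvTargetB : PySem.Dict String Int :=
  PySem.Dict.ofList [("red", 12), ("green", 13), ("blue", 14)]

-- one (color, val) pair folded into the per-game maxima dict
-- ('if color not in maxima or val > maxima[color]: maxima[color] = val')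
def pvBStep (m : PySem.Dict String Int) (p : String × Int) : PySem.Dict String Int :=
  match m.get? p.1 with
  | none => m.insert p.1 p.2
  | some cur => if p.2 > cur then m.insert p.1 p.2 else m

-- 'color in target and target[color] >= val'
def pvPredB (p : String × Int) : Bool :=
  match pvTargetB.get? p.1 with
  | some t => decide (t ≥ p.2)
  | none => false

def solver_1star_alt (data : List (Int × List (List (String × Int)))) : Int :=
  data.foldl
    (fun total gp =>
      let maxima := gp.2.foldl (fun m grab => grab.foldl pvBStep m) PySem.Dict.empty
      if maxima.items.all pvPredB then total + gp.1 else total)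
    0

-- ===== PRECONDITION & SPEC =====
def pvKnownPair (p : String × Int) : Bool :=
  p.1 == "red" || p.1 == "green" || p.1 == "blue"

def pvWithinPair (p : String × Int) : Bool :=
  (p.1 == "red" && decide (p.2 ≤ 12)) || (p.1 == "green" && decide (p.2 ≤ 13))
    || (p.1 == "blue" && decide (p.2 ≤ 14))

-- closed form: game i-th grab mentions an unknown color while every earlier grab is
-- entirely within the limits
def pvGameRaisesCF (game : List (List (String × Int))) : Bool :=
  (List.range game.length).any (fun i =>
    !((game.getD i []).all pvKnownPair)
      && (game.take i).all (fun g => g.all pvWithinPair))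

-- Pre_ excludes exactly the inputs on which the Python A raises KeyError: some game
-- has a grab containing a color other than red/green/blue preceded only by
-- within-limit grabs, so A reaches it and indexes target with the unknown color.
def Pre_solver_1star (data : List (Int × List (List (String × Int)))) : Prop :=
  (data.all (fun gp => !pvGameRaisesCF gp.2)) = true
instance (data : List (Int × List (List (String × Int)))) : Decidable (Pre_solver_1star data) := by
  unfold Pre_solver_1star; infer_instance

def pvWitness_solver_1star : (List (Int × List (List (String × Int)))) :=
  [(5, [[("red", 3), ("blue", 2)], [("green", 13)]]), (7, [[("red", 13)]])]

def Spec_solver_1star (data : List (Int × List (List (String × Int)))) (out : Int) : Prop := out = solver_1star_alt data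
instance (data : List (Int × List (List (String × Int)))) (out : Int) : Decidable (Spec_solver_1star data out) := by unfold Spec_solver_1star; infer_instance

-- ===== CLAIM (what is proved, stated in full; the proofs are below) =====
def Claim_equal_solver_1star : Prop := ∀ (data : List (Int × List (List (String × Int)))), Dom_solver_1star data → Pre_solver_1star data → Spec_solver_1star data (solver_1star data)

-- ===== LEMMAS AND PROOFS =====

-- proof-side recursive form of pvGameRaisesCF (scan grabs left to right)
def pvGameRaises : List (List (String × Int)) → Bool
  | [] => false
  | grab :: rest =>
      if !(grab.all pvKnownPair) then true
      else if !(grab.all pvWithinPair) then false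
      else pvGameRaises rest

theorem pvCF_eq (game : List (List (String × Int))) :
    pvGameRaisesCF game = pvGameRaises game := by
  induction game with
  | nil => rfl
  | cons g rest ih =>
      unfold pvGameRaisesCF pvGameRaises
      rw [List.length_cons, List.range_succ_eq_map]
      simp only [List.any_cons, List.any_map, Function.comp_def, List.getD_cons_zero,
        List.getD_cons_succ, List.take_zero, List.take_succ_cons, List.all_nil,
        List.all_cons, Bool.and_true]
      by_cases hk : g.all pvKnownPair = true
      · rw [hk]
        by_cases hw : g.all pvWithinPair = true
        · rw [hw]
          simp only [Bool.not_true, Bool.false_or, Bool.true_and]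
          rw [if_neg (by simp), if_neg (by simp), ← ih]
          unfold pvGameRaisesCF; rfl
        · rw [Bool.eq_false_iff.mpr hw]
          simp
      · rw [Bool.eq_false_iff.mpr hk]
        simp

def pvPredA (p : String × Int) : Bool := decide (pvTargetA.getD p.1 0 ≥ p.2)

theorem pvBStep_nodup (m : PySem.Dict String Int) (p : String × Int)
    (h : m.keys.Nodup) : (pvBStep m p).keys.Nodup := by
  unfold pvBStep
  cases m.get? p.1 with
  | none => exact PySem.Dict.nodup_keys_insert _ _ _ h
  | some cur =>
      by_cases hgt : p.2 > cur
      · simp [hgt]; exact PySem.Dict.nodup_keys_insert _ _ _ h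
      · simp [hgt]; exact h

theorem pvPredB_antitone (k : String) (cur v : Int) (h : pvPredB (k, cur) = true)
    (hle : v ≤ cur) : pvPredB (k, v) = true := by
  unfold pvPredB at *
  cases hg : pvTargetB.get? k with
  | none => rw [hg] at h; exact absurd h (by simp)
  | some t => rw [hg] at h; simp at h ⊢; omega

theorem pvBStep_all (m : PySem.Dict String Int) (p : String × Int)
    (h : m.keys.Nodup) :
    (pvBStep m p).items.all pvPredB = (m.items.all pvPredB && pvPredB p) := by
  cases hg : m.get? p.1 with
  | none =>
      have e : pvBStep m p = m.insert p.1 p.2 := by unfold pvBStep; rw [hg]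
      rw [e]
      have hc : m.contains p.1 = false := by
        rw [PySem.Dict.contains_eq_isSome_get?, hg]; rfl
      rw [PySem.Dict.items_insert_of_not_contains _ _ hc]
      simp
  | some cur =>
      have hmem : (p.1, cur) ∈ m.items := PySem.Dict.mem_items_of_get?_eq_some _ hg
      have e : pvBStep m p = if p.2 > cur then m.insert p.1 p.2 else m := by
        unfold pvBStep; rw [hg]
      rw [e]
      by_cases hgt : p.2 > cur
      · have hc : m.contains p.1 = true := by
          rw [PySem.Dict.contains_eq_isSome_get?, hg]; rfl
        rw [if_pos hgt, PySem.Dict.items_insert_of_contains _ _ hc, List.all_map,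
            Bool.eq_iff_iff, Bool.and_eq_true, List.all_eq_true, List.all_eq_true]
        constructor
        · intro hall
          have hp : pvPredB p = true := by
            have := hall (p.1, cur) hmem
            simpa [Function.comp] using this
          refine ⟨?_, hp⟩
          intro q hq
          by_cases hk : (q.1 == p.1) = true
          · rcases q with ⟨qk, qv⟩
            have hq1 : qk = p.1 := by simpa using hk
            subst hq1
            have hqv : qv = cur := by
              have := PySem.Dict.get?_of_mem_items _ hq h
              rw [hg] at this; exact (Option.some.inj this).symm
            subst hqv
            exact pvPredB_antitone p.1 p.2 qv (by simpa using hp) (by omega)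
          · have := hall q hq
            simpa [Function.comp, hk] using this
        · rintro ⟨hall, hp⟩
          intro q hq
          by_cases hk : (q.1 == p.1) = true
          · simpa [Function.comp, hk] using hp
          · simpa [Function.comp, hk] using hall q hq
      · rw [if_neg hgt]
        have hcur : pvPredB (p.1, cur) = true → pvPredB p = true := fun hx =>
          pvPredB_antitone p.1 cur p.2 hx (by omega)
        by_cases hall : m.items.all pvPredB = true
        · have := hcur ((List.all_eq_true.mp hall) _ hmem)
          simp [hall]; simpa using this
        · simp [Bool.eq_false_iff.mpr hall]

theorem pvFoldPairs_all (ps : List (String × Int)) (m : PySem.Dict String Int)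
    (h : m.keys.Nodup) :
    (ps.foldl pvBStep m).items.all pvPredB = (m.items.all pvPredB && ps.all pvPredB) := by
  induction ps generalizing m with
  | nil => simp
  | cons p ps ih =>
      simp only [List.foldl_cons, List.all_cons]
      rw [ih _ (pvBStep_nodup m p h), pvBStep_all m p h]
      rw [Bool.and_assoc]

theorem pvFoldPairs_nodup (ps : List (String × Int)) (m : PySem.Dict String Int)
    (h : m.keys.Nodup) : (ps.foldl pvBStep m).keys.Nodup := by
  induction ps generalizing m with
  | nil => exact h
  | cons p ps ih => exact ih _ (pvBStep_nodup m p h)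

theorem pvFoldGame_all (game : List (List (String × Int))) (m : PySem.Dict String Int)
    (h : m.keys.Nodup) :
    ((game.foldl (fun m grab => grab.foldl pvBStep m) m).items.all pvPredB)
      = (m.items.all pvPredB && game.all (fun grab => grab.all pvPredB)) := by
  induction game generalizing m with
  | nil => simp
  | cons grab game ih =>
      simp only [List.foldl_cons, List.all_cons]
      rw [ih _ (pvFoldPairs_nodup grab m h), pvFoldPairs_all grab m h, Bool.and_assoc]

theorem pvAValid_eq_all (game : List (List (String × Int))) :
    pvAValid game = game.all (fun grab => grab.all pvPredA) := by
  induction game with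
  | nil => rfl
  | cons grab game ih =>
      unfold pvAValid
      rw [ih, List.all_map]
      have hid : (id ∘ fun p : String × Int => decide (pvTargetA.getD p.1 0 ≥ p.2)) = pvPredA := rfl
      rw [hid]
      cases hc : grab.all pvPredA <;> simp [hc]

-- on a known color the two per-pair checks agree
theorem pvKnown_pred (p : String × Int) (h : pvKnownPair p = true) :
    pvPredB p = pvPredA p := by
  rcases p with ⟨k, v⟩
  unfold pvKnownPair at h
  simp only [Bool.or_eq_true, beq_iff_eq] at h
  rcases h with (h | h) | h <;> subst h
  · have e : pvTargetB.get? "red" = some 12 := by rfl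
    have e2 : pvTargetA.getD "red" 0 = (12 : Int) := by rfl
    simp [pvPredB, pvPredA, e, e2]
  · have e : pvTargetB.get? "green" = some 13 := by rfl
    have e2 : pvTargetA.getD "green" 0 = (13 : Int) := by rfl
    simp [pvPredB, pvPredA, e, e2]
  · have e : pvTargetB.get? "blue" = some 14 := by rfl
    have e2 : pvTargetA.getD "blue" 0 = (14 : Int) := by rfl
    simp [pvPredB, pvPredA, e, e2]

-- on a known color 'within the limits' is exactly predA
theorem pvKnown_within (p : String × Int) (h : pvKnownPair p = true) :
    pvWithinPair p = pvPredA p := by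
  rcases p with ⟨k, v⟩
  unfold pvKnownPair at h
  simp only [Bool.or_eq_true, beq_iff_eq] at h
  rcases h with (h | h) | h <;> subst h
  · have e2 : pvTargetA.getD "red" 0 = (12 : Int) := by rfl
    simp [pvWithinPair, pvPredA, e2]
  · have e2 : pvTargetA.getD "green" 0 = (13 : Int) := by rfl
    simp [pvWithinPair, pvPredA, e2]
  · have e2 : pvTargetA.getD "blue" 0 = (14 : Int) := by rfl
    simp [pvWithinPair, pvPredA, e2]

-- within a non-raising game the two validity conditions agree
theorem pvGame_eq (game : List (List (String × Int))) (h : pvGameRaises game = false) :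
    game.all (fun grab => grab.all pvPredB) = game.all (fun grab => grab.all pvPredA) := by
  induction game with
  | nil => rfl
  | cons grab rest ih =>
      unfold pvGameRaises at h
      by_cases hk : grab.all pvKnownPair = true
      · rw [hk] at h; simp only [Bool.not_true] at h
        have hgrab : grab.all pvPredB = grab.all pvPredA := by
          rw [Bool.eq_iff_iff, List.all_eq_true, List.all_eq_true]
          constructor <;> intro hall q hq <;>
            have hkq := (List.all_eq_true.mp hk) q hq
          · rw [← pvKnown_pred q hkq]; exact hall q hq
          · rw [pvKnown_pred q hkq]; exact hall q hq
        by_cases hw : grab.all pvWithinPair = true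
        · rw [hw] at h; simp only [Bool.not_true] at h
          simp only [List.all_cons, hgrab, ih h]
        · have hA : grab.all pvPredA = false := by
            rw [Bool.eq_false_iff]
            intro hA
            apply hw
            rw [List.all_eq_true]
            intro q hq
            rw [pvKnown_within q ((List.all_eq_true.mp hk) q hq)]
            exact (List.all_eq_true.mp hA) q hq
          simp only [List.all_cons, hgrab, hA, Bool.false_and]
      · rw [Bool.eq_false_iff.mpr hk] at h; simp at h
  
-- summing A's collected id list equals a direct accumulation
theorem pvSum_eq (data : List (Int × List (List (String × Int)))) :
    ∀ (r : List Int) (t : Int),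
    ((data.foldl (fun ret p => if pvAValid p.2 then ret ++ [p.1] else ret) r).foldl (· + ·) t)
      = data.foldl (fun total gp => if pvAValid gp.2 then total + gp.1 else total) (r.foldl (· + ·) t) := by
  induction data with
  | nil => intro r t; rfl
  | cons p data ih =>
      intro r t
      simp only [List.foldl_cons]
      rw [ih]
      congr 1
      by_cases hc : pvAValid p.2 = true
      · simp [hc, List.foldl_append]
      · simp [Bool.eq_false_iff.mpr hc]

-- ===== VERDICT (by name: the statement is the Claim_ definition above) =====
theorem solver_1star_spec : Claim_equal_solver_1star := by
  intro data _ hpre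
  unfold Spec_solver_1star solver_1star solver_1star_alt
  rw [pvSum_eq data [] 0]
  refine Eq.symm (PySem.List.foldl_congr_mem _ _ _ _ ?_)
  intro total gp hmem
  have hnr : pvGameRaises gp.2 = false := by
    have := (List.all_eq_true.mp hpre) gp hmem
    rw [← pvCF_eq]
    simpa using this
  have hcond : ((gp.2.foldl (fun m grab => grab.foldl pvBStep m) PySem.Dict.empty).items.all pvPredB)
      = pvAValid gp.2 := by
    rw [pvFoldGame_all gp.2 PySem.Dict.empty (by simp), pvGame_eq gp.2 hnr,
        pvAValid_eq_all]
    simp [PySem.Dict.empty]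
  simp only [hcond]
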